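-- pv_equiv track=rewrite | github.com/z8Tygas/Laboratorios-de-Algoritmia-II | Torneio 3/espaca.py | espaca
-- ===== SOURCE A (Python) =====
-- def maiorPal(subfrase, palavras):
--     maxmatch = 0
--     for i in range(len(subfrase)+1):
--         for palavra in palavras:
--             if subfrase[:i] == palavra:
--                 maxmatch = max(maxmatch, i)
--     return maxmatch
--
-- def espaca(frase, palavras):
--     final = ""
--     maior = 1
--     while maior:
--         maior = maiorPal(frase, palavras)
--         if maior:
--             final += frase[:maior] + ' '
--             frase = frase[maior:]
--     return final[:-1]
-- ===== SOURCE B (Python) =====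
-- def _segments(frase, palavras):
--     segs = []
--     while True:
--         best = 0
--         for w in palavras:
--             if len(w) > best and frase.startswith(w):
--                 best = len(w)
--         if best == 0:
--             return segs
--         segs.append(frase[:best])
--         frase = frase[best:]
--
-- def espaca(frase, palavras):
--     return ' '.join(_segments(frase, palavras))
-- ===== Notes on version B (the rewrite author's own statement) =====
-- stated objective: faster
-- what changed: A rescans every prefix length of the remaining phrase against every word with slice comparisons at each step; B finds the longest matching word in one startswith pass per step, collects the segments in a list and joins them once instead of growing a string with a trailing space.
import Mathlib
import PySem

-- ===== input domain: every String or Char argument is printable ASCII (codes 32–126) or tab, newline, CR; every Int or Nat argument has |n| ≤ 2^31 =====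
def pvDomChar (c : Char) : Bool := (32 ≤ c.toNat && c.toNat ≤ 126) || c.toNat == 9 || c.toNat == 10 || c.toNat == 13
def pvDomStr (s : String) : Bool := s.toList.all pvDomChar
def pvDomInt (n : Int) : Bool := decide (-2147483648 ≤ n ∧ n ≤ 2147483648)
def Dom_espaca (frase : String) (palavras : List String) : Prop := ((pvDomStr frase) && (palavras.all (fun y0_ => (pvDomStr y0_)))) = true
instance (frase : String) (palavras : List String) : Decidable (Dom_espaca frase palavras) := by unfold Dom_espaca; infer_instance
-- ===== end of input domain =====

-- B replaces A's per-step scan over every prefix length (len+1 slice comparisons per word)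
-- by a single pass over the words with startswith, collecting the segments and joining once.

-- ===== PORT A =====
-- maiorPal: for i in range(len(subfrase)+1): for palavra in palavras: if subfrase[:i] == palavra: maxmatch = max(maxmatch, i)
def maiorPal (sub : List Char) (pal : List String) : Int :=
  (PySem.List.pyRange 0 (sub.length + 1) 1).foldl
    (fun mx i => pal.foldl
      (fun mx w => if PySem.List.slice sub none (some i) = w.toList then max mx i else mx) mx) 0

-- bounds on maiorPal, needed for the while-loop's termination (cited in decreasing_by)
theorem maiorPal_bounds (sub : List Char) (pal : List String) :
    0 ≤ maiorPal sub pal ∧ maiorPal sub pal ≤ (sub.length : Int) := by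
  unfold maiorPal
  have inner : ∀ (i : Int) (mx : Int), 0 ≤ mx → mx ≤ (sub.length : Int) →
      0 ≤ i → i ≤ (sub.length : Int) →
      0 ≤ pal.foldl (fun mx w => if PySem.List.slice sub none (some i) = w.toList then max mx i else mx) mx ∧
      pal.foldl (fun mx w => if PySem.List.slice sub none (some i) = w.toList then max mx i else mx) mx ≤ (sub.length : Int) := by
    intro i
    induction pal with
    | nil => intro mx h1 h2 h3 h4; exact ⟨h1, h2⟩
    | cons w ws ih =>
      intro mx h1 h2 h3 h4
      simp only [List.foldl_cons]
      split
      · exact ih _ (le_max_of_le_left h1) (max_le h2 h4) h3 h4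
      · exact ih _ h1 h2 h3 h4
  have outer : ∀ (is : List Int) (mx : Int), (∀ i ∈ is, 0 ≤ i ∧ i ≤ (sub.length : Int)) →
      0 ≤ mx → mx ≤ (sub.length : Int) →
      0 ≤ is.foldl (fun mx i => pal.foldl
        (fun mx w => if PySem.List.slice sub none (some i) = w.toList then max mx i else mx) mx) mx ∧
      is.foldl (fun mx i => pal.foldl
        (fun mx w => if PySem.List.slice sub none (some i) = w.toList then max mx i else mx) mx) mx ≤ (sub.length : Int) := by
    intro is
    induction is with
    | nil => intro mx _ h1 h2; exact ⟨h1, h2⟩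
    | cons i is ih =>
      intro mx hmem h1 h2
      simp only [List.foldl_cons]
      obtain ⟨hi0, hil⟩ := hmem i (by simp)
      obtain ⟨a, b⟩ := inner i mx h1 h2 hi0 hil
      exact ih _ (fun j hj => hmem j (by simp [hj])) a b
  refine outer _ 0 ?_ le_rfl (by positivity)
  intro i hi
  rw [PySem.List.mem_pyRange_one] at hi
  omega

theorem maiorPal_shrinks {frase : List Char} {pal : List String}
    (h : ¬ maiorPal frase pal = 0) :
    (PySem.List.slice frase (some (maiorPal frase pal)) none).length < frase.length := by
  obtain ⟨h0, hl⟩ := maiorPal_bounds frase pal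
  rw [PySem.List.slice_from frase h0, List.length_drop]
  omega

-- the while loop of espaca: state (frase, final)
def espacaLoop (frase : List Char) (pal : List String) (final : List Char) : List Char :=
  if maiorPal frase pal = 0 then final
  else
    espacaLoop (PySem.List.slice frase (some (maiorPal frase pal)) none) pal
      (final ++ PySem.List.slice frase none (some (maiorPal frase pal)) ++ [' '])
termination_by frase.length
decreasing_by exact maiorPal_shrinks (by assumption)

def espaca (frase : String) (palavras : List String) : String :=
  String.ofList (PySem.List.slice (espacaLoop frase.toList palavras []) none (some (-1)))

-- ===== PORT B =====
-- best = length of the longest word frase startswith (0 if none), in one pass over palavras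
def bestMatch (frase : List Char) (pal : List String) : Int :=
  pal.foldl
    (fun best w => if PySem.Str.len w > best && PySem.Chars.startswith frase w.toList
                   then PySem.Str.len w else best) 0

theorem bestMatch_bounds (frase : List Char) (pal : List String) :
    0 ≤ bestMatch frase pal ∧ bestMatch frase pal ≤ (frase.length : Int) := by
  unfold bestMatch
  have main : ∀ (ws : List String) (b : Int), 0 ≤ b → b ≤ (frase.length : Int) →
      0 ≤ ws.foldl (fun best w => if PySem.Str.len w > best && PySem.Chars.startswith frase w.toList
                   then PySem.Str.len w else best) b ∧
      ws.foldl (fun best w => if PySem.Str.len w > best && PySem.Chars.startswith frase w.toList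
                   then PySem.Str.len w else best) b ≤ (frase.length : Int) := by
    intro ws
    induction ws with
    | nil => intro b h1 h2; exact ⟨h1, h2⟩
    | cons w ws ih =>
      intro b h1 h2
      simp only [List.foldl_cons]
      by_cases hc : (PySem.Str.len w > b && PySem.Chars.startswith frase w.toList) = true
      · rw [if_pos hc]
        simp only [Bool.and_eq_true, decide_eq_true_eq] at hc
        have hpre : w.toList <+: frase := (PySem.Chars.startswith_iff _ _).mp hc.2
        have hle : w.toList.length ≤ frase.length := hpre.length_le
        rw [PySem.Str.len_eq]
        exact ih _ (by positivity) (by exact_mod_cast hle)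
      · rw [if_neg hc]; exact ih _ h1 h2
  exact main pal 0 le_rfl (by positivity)

theorem bestMatch_shrinks {frase : List Char} {pal : List String}
    (h : ¬ bestMatch frase pal = 0) :
    (PySem.List.slice frase (some (bestMatch frase pal)) none).length < frase.length := by
  obtain ⟨h0, hl⟩ := bestMatch_bounds frase pal
  rw [PySem.List.slice_from frase h0, List.length_drop]
  omega

-- the while loop of _segments: collects the matched pieces in order
def segs (frase : List Char) (pal : List String) : List (List Char) :=
  if bestMatch frase pal = 0 then []
  else PySem.List.slice frase none (some (bestMatch frase pal)) ::
       segs (PySem.List.slice frase (some (bestMatch frase pal)) none) pal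
termination_by frase.length
decreasing_by exact bestMatch_shrinks (by assumption)

def espaca_alt (frase : String) (palavras : List String) : String :=
  String.ofList (PySem.Chars.join [' '] (segs frase.toList palavras))

-- ===== PRECONDITION & SPEC =====
def Spec_espaca (frase : String) (palavras : List String) (out : String) : Prop := out = espaca_alt frase palavras
instance (frase : String) (palavras : List String) (out : String) : Decidable (Spec_espaca frase palavras out) := by unfold Spec_espaca; infer_instance

-- ===== CLAIM (what is proved, stated in full; the proofs are below) =====
def Claim_equal_espaca : Prop := ∀ (frase : String) (palavras : List String), Dom_espaca frase palavras → Spec_espaca frase palavras (espaca frase palavras)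

-- ===== LEMMAS AND PROOFS =====

-- generic "max of the values passing a filter" fold, with its characterisation
def pvFoldMax {α : Type} (f : α → Int) (p : α → Bool) (xs : List α) (mx : Int) : Int :=
  xs.foldl (fun a x => if p x then max a (f x) else a) mx

theorem pvFoldMax_init_le {α : Type} (f : α → Int) (p : α → Bool) (xs : List α) (mx : Int) :
    mx ≤ pvFoldMax f p xs mx := by
  induction xs generalizing mx with
  | nil => exact le_rfl
  | cons x xs ih =>
    unfold pvFoldMax at *
    simp only [List.foldl_cons]
    split
    · exact le_trans (le_max_left _ _) (ih _)
    · exact ih _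

theorem pvFoldMax_le {α : Type} (f : α → Int) (p : α → Bool) {x : α} (hp : p x = true) :
    ∀ (xs : List α) (mx : Int), x ∈ xs → f x ≤ pvFoldMax f p xs mx := by
  intro xs
  induction xs with
  | nil => intro mx h; cases h
  | cons y ys ih =>
    intro mx hx
    unfold pvFoldMax at *
    simp only [List.foldl_cons]
    rcases List.mem_cons.mp hx with rfl | hmem
    · rw [if_pos hp]
      exact le_trans (le_max_right _ _) (pvFoldMax_init_le f p ys _)
    · split <;> exact ih _ hmem

theorem pvFoldMax_cases {α : Type} (f : α → Int) (p : α → Bool) (xs : List α) (mx : Int) :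
    pvFoldMax f p xs mx = mx ∨ ∃ x ∈ xs, p x = true ∧ pvFoldMax f p xs mx = f x := by
  induction xs generalizing mx with
  | nil => exact Or.inl rfl
  | cons y ys ih =>
    unfold pvFoldMax at *
    simp only [List.foldl_cons]
    by_cases hp : p y = true
    · rw [if_pos hp]
      rcases ih (max mx (f y)) with h | ⟨x, hx, hpx, hval⟩
      · rcases max_cases mx (f y) with ⟨he, _⟩ | ⟨he, _⟩
        · exact Or.inl (h.trans he)
        · exact Or.inr ⟨y, by simp, hp, h.trans he⟩
      · exact Or.inr ⟨x, by simp [hx], hpx, hval⟩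
    · rw [if_neg hp]
      rcases ih mx with h | ⟨x, hx, hpx, hval⟩
      · exact Or.inl h
      · exact Or.inr ⟨x, by simp [hx], hpx, hval⟩

-- A's inner loop over the words collapses to a single membership test
theorem maiorPal_inner (sub : List Char) (pal : List String) (i : Int) (mx : Int) :
    pal.foldl (fun mx w => if PySem.List.slice sub none (some i) = w.toList then max mx i else mx) mx
    = if pal.any (fun w => PySem.List.slice sub none (some i) = w.toList) then max mx i else mx := by
  induction pal generalizing mx with
  | nil => simp
  | cons w ws ih =>
    simp only [List.foldl_cons]
    by_cases hc : PySem.List.slice sub none (some i) = w.toList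
    · rw [if_pos hc, ih]
      split
      · rw [max_assoc, max_self, if_pos (by simp [hc])]
      · rw [if_pos (by simp [hc])]
    · rw [if_neg hc, ih]
      simp [hc]

theorem maiorPal_eq_pvFoldMax (sub : List Char) (pal : List String) :
    maiorPal sub pal
    = pvFoldMax id (fun i => pal.any (fun w => PySem.List.slice sub none (some i) = w.toList))
        (PySem.List.pyRange 0 (sub.length + 1) 1) 0 := by
  unfold maiorPal pvFoldMax
  refine PySem.List.foldl_congr_mem _ _ _ _ (fun mx i _ => ?_)
  rw [maiorPal_inner]
  rfl

theorem bestMatch_eq_pvFoldMax (frase : List Char) (pal : List String) :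
    bestMatch frase pal
    = pvFoldMax PySem.Str.len (fun w => PySem.Chars.startswith frase w.toList) pal 0 := by
  unfold bestMatch pvFoldMax
  refine PySem.List.foldl_congr_mem _ _ _ _ (fun b w _ => ?_)
  by_cases hs : PySem.Chars.startswith frase w.toList = true
  · simp only [hs, Bool.and_true, gt_iff_lt, decide_eq_true_eq]
    split
    · next h => exact (max_eq_right h.le).symm
    · next h => exact (max_eq_left (not_lt.mp h)).symm
  · simp [hs]

-- the central fact: A's longest-prefix length equals B's
theorem maiorPal_eq_bestMatch (sub : List Char) (pal : List String) :
    maiorPal sub pal = bestMatch sub pal := by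
  rw [maiorPal_eq_pvFoldMax, bestMatch_eq_pvFoldMax]
  apply le_antisymm
  · rcases pvFoldMax_cases id (fun i => pal.any (fun w => PySem.List.slice sub none (some i) = w.toList))
      (PySem.List.pyRange 0 (sub.length + 1) 1) 0 with h | ⟨i, hi, hp, hval⟩
    · rw [h]; exact pvFoldMax_init_le _ _ _ _
    · rw [hval]
      rw [PySem.List.mem_pyRange_one] at hi
      rcases List.any_eq_true.mp hp with ⟨w, hw, hmatch⟩
      have hmatch' : PySem.List.slice sub none (some i) = w.toList := by simpa using hmatch
      rw [PySem.List.slice_to sub hi.1] at hmatch'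
      have hpre : w.toList <+: sub := hmatch' ▸ List.take_prefix _ _
      have hlen : w.toList.length = i.toNat := by
        rw [← hmatch', List.length_take]
        omega
      have hcast : (i : Int) = PySem.Str.len w := by
        rw [PySem.Str.len_eq, hlen]
        omega
      rw [id, hcast]
      exact pvFoldMax_le PySem.Str.len (fun v => PySem.Chars.startswith sub v.toList)
        ((PySem.Chars.startswith_iff _ _).mpr hpre) pal 0 hw
  · rcases pvFoldMax_cases PySem.Str.len
      (fun w => PySem.Chars.startswith sub w.toList) pal 0 with h | ⟨w, hw, hp, hval⟩
    · rw [h]; exact pvFoldMax_init_le _ _ _ _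
    · rw [hval]
      have hpre : w.toList <+: sub := (PySem.Chars.startswith_iff _ _).mp hp
      have hlen : w.toList.length ≤ sub.length := hpre.length_le
      have hmem : ((w.toList.length : Int)) ∈ PySem.List.pyRange 0 (sub.length + 1) 1 := by
        rw [PySem.List.mem_pyRange_one]; omega
      have hany : (pal.any (fun v => PySem.List.slice sub none (some (w.toList.length : Int)) = v.toList)) = true := by
        refine List.any_eq_true.mpr ⟨w, hw, ?_⟩
        rw [PySem.List.slice_to sub (by positivity)]
        simp only [Int.toNat_natCast, decide_eq_true_eq]
        exact (List.prefix_iff_eq_take.mp hpre).symm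
      have hfin := pvFoldMax_le id
        (fun i => pal.any (fun w => PySem.List.slice sub none (some i) = w.toList))
        hany (PySem.List.pyRange 0 (sub.length + 1) 1) 0 hmem
      rw [PySem.Str.len_eq]
      simpa using hfin
  
-- A's loop produces, after final, each segment followed by a space
theorem espacaLoop_eq (frase : List Char) (pal : List String) (final : List Char) :
    espacaLoop frase pal final = final ++ ((segs frase pal).map (· ++ [' '])).flatten := by
  fun_induction espacaLoop frase pal final with
  | case1 frase final h =>
    rw [segs, if_pos (by rw [← maiorPal_eq_bestMatch]; exact h)]
    simp
  | case2 frase final h ih =>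
    rw [segs, if_neg (by rw [← maiorPal_eq_bestMatch]; exact h)]
    rw [ih, ← maiorPal_eq_bestMatch]
    simp

-- dropping the trailing space is exactly joining with ' '
theorem dropLast_flatten_eq_join (L : List (List Char)) :
    (L.map (· ++ [' '])).flatten.dropLast = PySem.Chars.join [' '] L := by
  induction L with
  | nil => simp [PySem.Chars.join_nil]
  | cons a L ih =>
    cases L with
    | nil => simp [PySem.Chars.join_singleton]
    | cons b M =>
      rw [PySem.Chars.join_cons_cons, ← ih]
      simp only [List.map_cons, List.flatten_cons]
      rw [List.dropLast_append_of_ne_nil (by simp)]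

-- ===== VERDICT (by name: the statement is the Claim_ definition above) =====
theorem espaca_spec : Claim_equal_espaca := by
  intro frase palavras _
  unfold Spec_espaca espaca espaca_alt
  rw [espacaLoop_eq, List.nil_append, PySem.List.slice_to_neg_one, dropLast_flatten_eq_join]
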